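-- pv_equiv track=rewrite | github.com/Marco-de-Sa/comp2 | prisonerHatsThreeColours.py | first_two_prisoner
-- ===== SOURCE A (Python) =====
-- def first_two_prisoner(prisoners):
--     hatCount = 0
--     guesses = []
--
--     # counts the amount of white hats infront of the second last prisoner
--     for i in range(len(prisoners)-2):
--         if prisoners[i] == 1:
--             hatCount += 1
--     if hatCount % 2 == 0:
--         guesses.append("white")
--     if hatCount % 2 == 1:
--         guesses.append("black")
--     hatCount = 0
--     # counts the amount of grey hats infront of the second last prisoner
--     for i in range(len(prisoners)-2):
--         if prisoners[i] == 2: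
--             hatCount += 1
--     if hatCount % 2 == 0:
--         guesses.append("grey")
--     if hatCount % 2 == 1:
--         guesses.append("black")
--     return prisoner_guess(guesses, prisoners)
--
-- def prisoner_guess(guesses, prisoners):
--     hatCountWhite = 0
--     hatCountGrey = 0
--     isEvenWhite = 0
--     isEvenGrey = 0
--     iterHat = 3
--     whiteOrBlackOrGrey = "white"
--
--     # if the first guess is white it sets isEvenWhite to 0 and if not it sets it to 1
--     if guesses[0] == "white":
--         isEvenWhite = 0
--     elif guesses[0] == "black":
--         isEvenWhite = 1
--
--     # if the second guess is grey it sets isEvenGrey to 0 and if not it sets it to 1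
--     if guesses[1] == "grey":
--         isEvenGrey = 0
--     elif guesses[1] == "black":
--         isEvenGrey = 1
--
--     # main loop for the prisoner hat counting algorithm
--     while True:
--         # counts the amount of white hats
--         for j in range(len(prisoners) - iterHat):
--             if prisoners[j] == 1:
--                 hatCountWhite += 1
--         # counts the amount of grey hats
--         for j in range(len(prisoners) - iterHat):
--             if prisoners[j] == 2:
--                 hatCountGrey += 1
--         # iterates the position by 1
--         iterHat += 1
--         # checks for changes in the number of white or grey hats by comparing if they have
--         # changes in whether they are even or odd if no changes are detected black is guessed
--         if hatCountWhite%2 == isEvenWhite and hatCountGrey%2 == isEvenGrey: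
--             whiteOrBlackOrGrey = "black"
--             guesses.append(whiteOrBlackOrGrey)
--             if len(guesses) == len(prisoners):
--                 break
--         elif hatCountGrey%2 != isEvenGrey:
--             whiteOrBlackOrGrey = "grey"
--             guesses.append(whiteOrBlackOrGrey)
--             if isEvenGrey == 0:
--                 isEvenGrey = 1
--             else:
--                 isEvenGrey = 0
--             if len(guesses) == len(prisoners):
--                 break
--         else:
--             # sets the guess to white
--             whiteOrBlackOrGrey = "white"
--             # appends the whiteOrBlackOrGrey to the guess list
--             guesses.append(whiteOrBlackOrGrey)
--             # following if else statement switches the isEven values from 1 to 0 and 0 to 1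
--             if isEvenWhite == 0:
--                 isEvenWhite = 1
--             else:
--                 isEvenWhite = 0
--             # detects if the guess limit is reached and then breaks out of the for loop
--             if len(guesses) == len(prisoners):
--                 break
--         # resets the counters for both the white and the black hats
--         hatCountWhite = 0
--         hatCountGrey = 0
--     # returns the array of guesses
--     return guesses
-- ===== SOURCE B (Python) =====
-- def first_two_prisoner(prisoners):
--     front = prisoners[:len(prisoners) - 2]
--     w = sum(1 for x in front if x == 1) % 2
--     g = sum(1 for x in front if x == 2) % 2
--     guesses = ["white" if w == 0 else "black", "grey" if g == 0 else "black"]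
--     for x in reversed(front):
--         guesses.append("white" if x == 1 else "grey" if x == 2 else "black")
--     return guesses
-- ===== Notes on version B (the rewrite author's own statement) =====
-- stated objective: faster
-- what changed: B replaces the quadratic while-loop that rescans the whole prefix for white/grey parities on every guess by one pass: the first two parity guesses are computed once, and each later guess is read off directly from the prisoner whose removal changes the prefix parity (prisoners[:n-2] traversed in reverse), since exactly one parity flips per step.
import Mathlib
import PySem

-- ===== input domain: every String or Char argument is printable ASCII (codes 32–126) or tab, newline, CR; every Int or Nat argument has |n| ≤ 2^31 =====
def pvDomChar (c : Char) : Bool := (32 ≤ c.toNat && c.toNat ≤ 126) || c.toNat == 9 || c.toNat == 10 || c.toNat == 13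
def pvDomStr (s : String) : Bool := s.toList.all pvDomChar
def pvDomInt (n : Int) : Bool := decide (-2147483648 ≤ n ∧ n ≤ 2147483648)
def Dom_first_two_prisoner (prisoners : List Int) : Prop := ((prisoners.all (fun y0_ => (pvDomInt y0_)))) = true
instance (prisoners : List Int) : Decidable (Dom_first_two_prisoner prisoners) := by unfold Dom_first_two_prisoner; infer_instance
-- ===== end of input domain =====

-- B is one O(n) pass instead of A's O(n^2) rescans; equivalence is about the return value only
-- (A mutates its local guesses list, which the caller cannot observe).

-- ===== PORT A =====
-- literal port of the 'while True' loop of prisoner_guess; the loop terminates when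
-- len(guesses) == len(prisoners), reached within len(prisoners) iterations whenever
-- Pre_ holds, so fuel := prisoners.length only makes the recursion total (no algorithm change)
def pgLoop (p : List Int) : Nat → List String → Int → Int → Int → List String
  | 0, guesses, _, _, _ => guesses
  | Nat.succ fuel, guesses, isEvenWhite, isEvenGrey, iterHat =>
    let hatCountWhite := (PySem.List.pyRange 0 ((p.length : Int) - iterHat) 1).foldl
      (fun acc j => if PySem.List.pyGetD p j 0 == 1 then acc + 1 else acc) (0 : Int)
    let hatCountGrey := (PySem.List.pyRange 0 ((p.length : Int) - iterHat) 1).foldl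
      (fun acc j => if PySem.List.pyGetD p j 0 == 2 then acc + 1 else acc) (0 : Int)
    let iterHat := iterHat + 1
    if PySem.Int.mod hatCountWhite 2 == isEvenWhite && PySem.Int.mod hatCountGrey 2 == isEvenGrey then
      let guesses := guesses ++ ["black"]
      if guesses.length == p.length then guesses
      else pgLoop p fuel guesses isEvenWhite isEvenGrey iterHat
    else if !(PySem.Int.mod hatCountGrey 2 == isEvenGrey) then
      let guesses := guesses ++ ["grey"]
      let isEvenGrey := if isEvenGrey == 0 then (1 : Int) else 0
      if guesses.length == p.length then guesses
      else pgLoop p fuel guesses isEvenWhite isEvenGrey iterHat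
    else
      let guesses := guesses ++ ["white"]
      let isEvenWhite := if isEvenWhite == 0 then (1 : Int) else 0
      if guesses.length == p.length then guesses
      else pgLoop p fuel guesses isEvenWhite isEvenGrey iterHat

def prisoner_guess (guesses : List String) (prisoners : List Int) : List String :=
  let isEvenWhite : Int :=
    if PySem.List.pyGetD guesses 0 "" == "white" then 0
    else if PySem.List.pyGetD guesses 0 "" == "black" then 1
    else 0
  let isEvenGrey : Int :=
    if PySem.List.pyGetD guesses 1 "" == "grey" then 0
    else if PySem.List.pyGetD guesses 1 "" == "black" then 1
    else 0
  pgLoop prisoners prisoners.length guesses isEvenWhite isEvenGrey 3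

def first_two_prisoner (prisoners : List Int) : List String :=
  let hatCount := (PySem.List.pyRange 0 ((prisoners.length : Int) - 2) 1).foldl
    (fun acc i => if PySem.List.pyGetD prisoners i 0 == 1 then acc + 1 else acc) (0 : Int)
  let guesses : List String := []
  let guesses := if PySem.Int.mod hatCount 2 == 0 then guesses ++ ["white"] else guesses
  let guesses := if PySem.Int.mod hatCount 2 == 1 then guesses ++ ["black"] else guesses
  let hatCount := (PySem.List.pyRange 0 ((prisoners.length : Int) - 2) 1).foldl
    (fun acc i => if PySem.List.pyGetD prisoners i 0 == 2 then acc + 1 else acc) (0 : Int)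
  let guesses := if PySem.Int.mod hatCount 2 == 0 then guesses ++ ["grey"] else guesses
  let guesses := if PySem.Int.mod hatCount 2 == 1 then guesses ++ ["black"] else guesses
  prisoner_guess guesses prisoners

-- ===== PORT B =====
-- prisoners[:len(prisoners)-2] ported as List.take (len-2): exact under Pre_ (length ≥ 3, so the stop is ≥ 1)
def first_two_prisoner_alt (prisoners : List Int) : List String :=
  let front := prisoners.take (prisoners.length - 2)
  let w := PySem.Int.mod ((front.countP (fun x => x == 1) : Nat) : Int) 2
  let g := PySem.Int.mod ((front.countP (fun x => x == 2) : Nat) : Int) 2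
  let guesses := [if w == 0 then "white" else "black", if g == 0 then "grey" else "black"]
  front.reverse.foldl
    (fun acc x => acc ++ [if x == 1 then "white" else if x == 2 then "grey" else "black"])
    guesses

-- ===== PRECONDITION & SPEC =====
-- Pre_ excludes lists of fewer than 3 prisoners, on which A's while-loop never reaches
-- len(guesses) == len(prisoners) and diverges (A returns no value there).
def Pre_first_two_prisoner (prisoners : List Int) : Prop := 3 ≤ prisoners.length
instance (prisoners : List Int) : Decidable (Pre_first_two_prisoner prisoners) := by
  unfold Pre_first_two_prisoner; infer_instance

def pvWitness_first_two_prisoner : List Int := [1, 2, 0, 1]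

def Spec_first_two_prisoner (prisoners : List Int) (out : List String) : Prop := out = first_two_prisoner_alt prisoners
instance (prisoners : List Int) (out : List String) : Decidable (Spec_first_two_prisoner prisoners out) := by unfold Spec_first_two_prisoner; infer_instance

-- ===== CLAIM (what is proved, stated in full; the proofs are below) =====
def Claim_equal_first_two_prisoner : Prop := ∀ (prisoners : List Int), Dom_first_two_prisoner prisoners → Pre_first_two_prisoner prisoners → Spec_first_two_prisoner prisoners (first_two_prisoner prisoners)

-- ===== LEMMAS AND PROOFS =====

-- the classifier B applies to each prisoner of the reversed front
def pvCls (x : Int) : String := if x == 1 then "white" else if x == 2 then "grey" else "black"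

-- A's counting for-loop over range(k) is the countP of the k-prefix
lemma pv_count_loop (p : List Int) (v : Int) (k : Nat) (hk : k ≤ p.length) :
    (PySem.List.pyRange 0 (k : Int) 1).foldl
      (fun acc j => if PySem.List.pyGetD p j 0 == v then acc + 1 else acc) (0 : Int)
    = (((p.take k).countP (fun x => x == v) : Nat) : Int) := by
  induction k with
  | zero => simp [PySem.List.pyRange_one_eq_nil]
  | succ k ih =>
    have hk' : k ≤ p.length := Nat.le_of_succ_le hk
    have hklt : k < p.length := hk
    have h1 : ((k + 1 : Nat) : Int) = (k : Int) + 1 := by push_cast; ring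
    rw [h1, PySem.List.pyRange_one_succ_right (by positivity), List.foldl_append, ih hk']
    have htake : p.take (k + 1) = p.take k ++ [p[k]] := by
      rw [List.take_succ, List.getElem?_eq_getElem hklt]; rfl
    rw [htake, List.countP_append]
    simp only [List.foldl_cons, List.foldl_nil, PySem.List.pyGetD_natCast,
      List.getD_eq_getElem?_getD, List.getElem?_eq_getElem hklt, Option.getD_some]
    by_cases h : p[k] = v <;> simp [h]

-- one iteration of the loop
-- one iteration of A's while-loop: with the parities of the (m+1)-prefix as state and
-- iterHat = length - m, it appends exactly pvCls of the element whose removal the parities detect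
lemma pv_step (p : List Int) (m fuel : Nat) (guesses : List String)
    (hm : m + 3 ≤ p.length) (hg : guesses.length + m + 2 = p.length + 1) :
    pgLoop p (fuel + 1) guesses
      ((((p.take (m + 1)).countP (fun x => x == 1) % 2 : Nat) : Int))
      ((((p.take (m + 1)).countP (fun x => x == 2) % 2 : Nat) : Int))
      ((p.length : Int) - (m : Int))
    = if m = 0 then guesses ++ [pvCls (p[m]'(by omega))]
      else pgLoop p fuel (guesses ++ [pvCls (p[m]'(by omega))])
        ((((p.take m).countP (fun x => x == 1) % 2 : Nat) : Int))
        ((((p.take m).countP (fun x => x == 2) % 2 : Nat) : Int))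
        ((p.length : Int) - ((m : Int) - 1)) := by
  have hmlt : m < p.length := by omega
  have hbound : (p.length : Int) - ((p.length : Int) - (m : Int)) = (m : Int) := by ring
  have htake : p.take (m + 1) = p.take m ++ [p[m]] := by
    rw [List.take_succ, List.getElem?_eq_getElem hmlt]; rfl
  have hmod : ∀ c : Nat, PySem.Int.mod ((c : Nat) : Int) 2 = ((c % 2 : Nat) : Int) := fun c => by
    exact_mod_cast PySem.Int.mod_natCast c 2
  show pgLoop p (fuel + 1) guesses _ _ _ = _
  rw [pgLoop]
  simp only [hbound, pv_count_loop p 1 m (by omega), pv_count_loop p 2 m (by omega), hmod]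
  rw [htake]
  simp only [List.countP_append, List.countP_singleton]
  set c1 := (p.take m).countP (fun x => x == 1) with hc1
  set c2 := (p.take m).countP (fun x => x == 2) with hc2
  by_cases h1 : p[m] = 1
  · -- white branch
    simp only [h1, pvCls]
    norm_num
    by_cases hm0 : m = 0
    · have : guesses.length + 1 = p.length := by omega
      simp [hm0, this]
      all_goals first | omega | (split_ifs <;> first | rfl | omega | (exfalso; omega) | (congr 1 <;> try omega) | (congr <;> omega) | (congr <;> (try norm_num) <;> omega))
    · have hlen : ¬ (guesses.length + 1 = p.length) := by omega
      have hiter : (p.length : Int) - (m : Int) + 1 = (p.length : Int) - ((m : Int) - 1) := by ring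
      simp [hm0, hlen, hiter]
      all_goals first | omega | (split_ifs <;> first | rfl | omega | (exfalso; omega) | (congr 1 <;> try omega) | (congr <;> omega) | (congr <;> (try norm_num) <;> omega))
  · by_cases h2 : p[m] = 2
    · -- grey branch
      simp only [h2, pvCls]
      norm_num
      by_cases hm0 : m = 0
      · have hL : guesses.length + 1 = p.length := by omega
        simp [hm0, hL]
        all_goals first | omega | (split_ifs <;> first | rfl | omega | (exfalso; omega) | (congr <;> omega) | (congr <;> (try norm_num) <;> omega))
      · have hlen : ¬ (guesses.length + 1 = p.length) := by omega
        have hiter : (p.length : Int) - (m : Int) + 1 = (p.length : Int) - ((m : Int) - 1) := by ring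
        simp [hm0, hlen, hiter]
        have hflip2 : (if (2:Int) ∣ (c2:Int) + 1 then (1:Int) else 0) = (c2:Int) % 2 := by
          by_cases hd : (2:Int) ∣ (c2:Int) + 1
          · rw [if_pos hd]; omega
          · rw [if_neg hd]; omega
        rw [if_neg (by omega), if_neg (by omega), hflip2]
    · -- black branch
      have hx1 : (if (p[m] == 1) = true then (1:Nat) else 0) = 0 := by simp [h1]
      have hx2 : (if (p[m] == 2) = true then (1:Nat) else 0) = 0 := by simp [h2]
      simp only [hx1, hx2, Nat.add_zero, pvCls, h1, h2]
      simp only [beq_self_eq_true, Bool.and_self]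
      norm_num [h1, h2]
      by_cases hm0 : m = 0
      · have hL : guesses.length + 1 = p.length := by omega
        simp [hm0, hL]
        all_goals first | omega | (split_ifs <;> first | rfl | omega | (exfalso; omega) | (congr <;> omega) | (congr <;> (try norm_num) <;> omega))
      · have hlen : ¬ (guesses.length + 1 = p.length) := by omega
        have hiter : (p.length : Int) - (m : Int) + 1 = (p.length : Int) - ((m : Int) - 1) := by ring
        simp [hm0, hlen, hiter]
        all_goals first | omega | (split_ifs <;> first | rfl | omega | (exfalso; omega) | (congr <;> omega) | (congr <;> (try norm_num) <;> omega))

-- invariant of A's whole while-loop: it appends pvCls of the reversed (m+1)-prefix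
lemma pv_loop_spec (p : List Int) (m : Nat) :
    ∀ (fuel : Nat) (guesses : List String),
      m + 3 ≤ p.length → m + 1 ≤ fuel → guesses.length + m + 2 = p.length + 1 →
      pgLoop p fuel guesses
        ((((p.take (m + 1)).countP (fun x => x == 1) % 2 : Nat) : Int))
        ((((p.take (m + 1)).countP (fun x => x == 2) % 2 : Nat) : Int))
        ((p.length : Int) - (m : Int))
      = guesses ++ ((p.take (m + 1)).reverse.map pvCls) := by
  induction m with
  | zero =>
    intro fuel guesses hm hfuel hg
    obtain ⟨f, rfl⟩ : ∃ f, fuel = f + 1 := ⟨fuel - 1, by omega⟩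
    rw [pv_step p 0 f guesses (by omega) (by omega), if_pos rfl]
    have h0 : p.take 1 = [p[0]'(by omega)] := by
      rw [List.take_succ, List.getElem?_eq_getElem (by omega : 0 < p.length)]; rfl
    simp [h0]
  | succ m ih =>
    intro fuel guesses hm hfuel hg
    obtain ⟨f, rfl⟩ : ∃ f, fuel = f + 1 := ⟨fuel - 1, by omega⟩
    rw [pv_step p (m + 1) f guesses (by omega) (by omega), if_neg (by omega)]
    have hiter : ((p.length : Int) - ((((m : Nat) + 1 : Nat) : Int) - 1)) = (p.length : Int) - (m : Int) := by
      push_cast; ring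
    rw [hiter, ih f (guesses ++ [pvCls (p[m + 1]'(by omega))]) (by omega) (by omega) (by simp; omega)]
    have htake : p.take (m + 2) = p.take (m + 1) ++ [p[m + 1]'(by omega)] := by
      rw [List.take_succ, List.getElem?_eq_getElem (by omega : m + 1 < p.length)]; rfl
    rw [htake]
    simp
    conv_rhs => rw [List.take_succ, List.getElem?_eq_getElem (show m + 1 < (List.map pvCls p).length by simp; omega)]
    simp

-- flattening reversed singleton blocks is mapping over the reverse
lemma pv_flat (f : Int → String) (l : List Int) :
    (l.map (fun x => [f x])).reverse.flatten = l.reverse.map f := by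
  induction l with
  | nil => simp
  | cons x xs ih => simp [ih]

lemma pv_main (p : List Int) (hp : 3 ≤ p.length) :
    first_two_prisoner p = first_two_prisoner_alt p := by
  have hc : ((p.length : Int) - 2) = ((p.length - 2 : Nat) : Int) := by omega
  have hmod : ∀ c : Nat, PySem.Int.mod ((c : Nat) : Int) 2 = ((c % 2 : Nat) : Int) := fun c => by
    exact_mod_cast PySem.Int.mod_natCast c 2
  unfold first_two_prisoner first_two_prisoner_alt prisoner_guess
  rw [hc, pv_count_loop p 1 _ (by omega), pv_count_loop p 2 _ (by omega)]
  simp only [hmod]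
  set c1 := ((p.take (p.length - 2)).countP (fun x => x == 1)) with hc1
  set c2 := ((p.take (p.length - 2)).countP (fun x => x == 2)) with hc2
  have hm3 : p.length - 3 + 1 = p.length - 2 := by omega
  have h3 : (3:Int) = (p.length : Int) - ((p.length - 3 : Nat) : Int) := by omega
  rcases Nat.mod_two_eq_zero_or_one c1 with h1 | h1 <;>
    rcases Nat.mod_two_eq_zero_or_one c2 with h2 | h2
  · simp only [h1, h2, Nat.cast_zero, Nat.cast_one]
    norm_num [PySem.List.pyGetD]
    try simp only [String.reduceEq, reduceIte]
    have hl := pv_loop_spec p (p.length - 3) p.length ["white", "grey"] (by omega) (by omega) (by simp; omega)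
    rw [hm3, ← hc1, ← hc2, h1, h2, ← h3] at hl
    norm_num at hl
    have hcls : pvCls = fun x => if x = 1 then "white" else if x = 2 then "grey" else "black" := by
      funext x; simp [pvCls]
    rw [hl]
    simp [← List.map_take, pv_flat, hcls]
  · simp only [h1, h2, Nat.cast_zero, Nat.cast_one]
    norm_num [PySem.List.pyGetD]
    try simp only [String.reduceEq, reduceIte]
    have hl := pv_loop_spec p (p.length - 3) p.length ["white", "black"] (by omega) (by omega) (by simp; omega)
    rw [hm3, ← hc1, ← hc2, h1, h2, ← h3] at hl
    norm_num at hl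
    have hcls : pvCls = fun x => if x = 1 then "white" else if x = 2 then "grey" else "black" := by
      funext x; simp [pvCls]
    rw [hl]
    simp [← List.map_take, pv_flat, hcls]
  · simp only [h1, h2, Nat.cast_zero, Nat.cast_one]
    norm_num [PySem.List.pyGetD]
    try simp only [String.reduceEq, reduceIte]
    have hl := pv_loop_spec p (p.length - 3) p.length ["black", "grey"] (by omega) (by omega) (by simp; omega)
    rw [hm3, ← hc1, ← hc2, h1, h2, ← h3] at hl
    norm_num at hl
    have hcls : pvCls = fun x => if x = 1 then "white" else if x = 2 then "grey" else "black" := by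
      funext x; simp [pvCls]
    rw [hl]
    simp [← List.map_take, pv_flat, hcls]
  · simp only [h1, h2, Nat.cast_zero, Nat.cast_one]
    norm_num [PySem.List.pyGetD]
    try simp only [String.reduceEq, reduceIte]
    have hl := pv_loop_spec p (p.length - 3) p.length ["black", "black"] (by omega) (by omega) (by simp; omega)
    rw [hm3, ← hc1, ← hc2, h1, h2, ← h3] at hl
    norm_num at hl
    have hcls : pvCls = fun x => if x = 1 then "white" else if x = 2 then "grey" else "black" := by
      funext x; simp [pvCls]
    rw [hl]
    simp [← List.map_take, pv_flat, hcls]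

-- ===== VERDICT (by name: the statement is the Claim_ definition above) =====
theorem first_two_prisoner_spec : Claim_equal_first_two_prisoner := by
  intro prisoners _ hpre
  exact pv_main prisoners hpre
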